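-- pv_equiv track=rewrite | github.com/Mounusha25/resumerank_audit | src/explainability/token_contribution.py | get_skill_overlap
-- ===== SOURCE A (Python) =====
-- from typing import List, Tuple, Dict, Any
--
-- def get_skill_overlap(
--
--     resume_skills: List[str],
--     job_skills: List[str],
-- ) -> Dict[str, List[str]]:
--     """Analyze skill overlap.
--
--     Args:
--         resume_skills: Skills from resume
--         job_skills: Required skills from job
--
--     Returns:
--         Dictionary with matched, missing, and extra skills
--     """
--     resume_set = {s.lower() for s in resume_skills}
--     job_set = {s.lower() for s in job_skills}
--
--     return {
--         "matched": sorted(list(resume_set & job_set)),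
--         "missing": sorted(list(job_set - resume_set)),
--         "extra": sorted(list(resume_set - job_set)),
--     }
-- ===== SOURCE B (Python) =====
-- def get_skill_overlap(resume_skills, job_skills):
--     status = {}
--     for s in resume_skills:
--         status[s.lower()] = (True, False)
--     for s in job_skills:
--         k = s.lower()
--         status[k] = (status.get(k, (False, False))[0], True)
--     matched, missing, extra = [], [], []
--     for k, (in_resume, in_job) in status.items():
--         if in_resume and in_job:
--             matched.append(k)
--         elif in_job:
--             missing.append(k)
--         else:
--             extra.append(k)
--     return {"matched": sorted(matched), "missing": sorted(missing), "extra": sorted(extra)}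
-- ===== Notes on version B (the rewrite author's own statement) =====
-- stated objective: alternative
-- what changed: Replaces A's two set comprehensions plus three separate set operations (intersection and two differences) by one dict mapping each lowercased skill to an (in-resume, in-job) flag pair built in two passes, followed by a single partitioning pass over the dict items that fills the matched/missing/extra buckets, each sorted at the end.
import Mathlib
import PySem

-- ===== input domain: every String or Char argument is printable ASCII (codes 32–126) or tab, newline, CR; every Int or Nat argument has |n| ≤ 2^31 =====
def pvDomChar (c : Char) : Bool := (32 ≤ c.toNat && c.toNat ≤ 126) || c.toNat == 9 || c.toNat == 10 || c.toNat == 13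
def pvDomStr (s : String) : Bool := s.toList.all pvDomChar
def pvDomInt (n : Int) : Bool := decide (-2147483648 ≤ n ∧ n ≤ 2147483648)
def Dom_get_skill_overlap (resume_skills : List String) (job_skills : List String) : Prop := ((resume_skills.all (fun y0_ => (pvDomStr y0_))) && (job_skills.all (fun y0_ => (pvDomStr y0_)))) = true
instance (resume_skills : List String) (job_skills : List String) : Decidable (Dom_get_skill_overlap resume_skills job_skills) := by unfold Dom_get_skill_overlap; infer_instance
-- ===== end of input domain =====

-- B replaces A's three set operations by one dict of (in-resume, in-job) flags built in two passes
-- plus a single partitioning pass over its items (objective: alternative decomposition, same cost).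

-- ===== PORT A =====
def get_skill_overlap (resume_skills : List String) (job_skills : List String) : List (String × List String) :=
  let resume_set := PySem.Set.ofList (resume_skills.map PySem.Str.lower)
  let job_set := PySem.Set.ofList (job_skills.map PySem.Str.lower)
  [("matched", PySem.List.sorted (PySem.Set.inter resume_set job_set) (fun x => x) false),
   ("missing", PySem.List.sorted (PySem.Set.diff job_set resume_set) (fun x => x) false),
   ("extra", PySem.List.sorted (PySem.Set.diff resume_set job_set) (fun x => x) false)]

-- ===== PORT B =====
def get_skill_overlap_alt (resume_skills : List String) (job_skills : List String) : List (String × List String) :=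
  -- status[k] = (seen in resume, seen in job), built in two passes
  let status : PySem.Dict String (Bool × Bool) :=
    resume_skills.foldl (fun d s => d.insert (PySem.Str.lower s) (true, false)) PySem.Dict.empty
  let status :=
    job_skills.foldl
      (fun d s => PySem.Dict.modify d (PySem.Str.lower s) (false, false) (fun p => (p.1, true))) status
  -- one partitioning pass over status.items()
  let acc :=
    status.items.foldl
      (fun acc p =>
        if p.2.1 && p.2.2 then (acc.1 ++ [p.1], acc.2.1, acc.2.2)
        else if p.2.2 then (acc.1, acc.2.1 ++ [p.1], acc.2.2)
        else (acc.1, acc.2.1, acc.2.2 ++ [p.1]))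
      (([] : List String), ([] : List String), ([] : List String))
  [("matched", PySem.List.sorted acc.1 (fun x => x) false),
   ("missing", PySem.List.sorted acc.2.1 (fun x => x) false),
   ("extra", PySem.List.sorted acc.2.2 (fun x => x) false)]

-- ===== PRECONDITION & SPEC =====
def Spec_get_skill_overlap (resume_skills : List String) (job_skills : List String) (out : List (String × List String)) : Prop := out = get_skill_overlap_alt resume_skills job_skills
instance (resume_skills : List String) (job_skills : List String) (out : List (String × List String)) : Decidable (Spec_get_skill_overlap resume_skills job_skills out) := by unfold Spec_get_skill_overlap; infer_instance

-- ===== CLAIM (what is proved, stated in full; the proofs are below) =====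
def Claim_equal_get_skill_overlap : Prop := ∀ (resume_skills : List String) (job_skills : List String), Dom_get_skill_overlap resume_skills job_skills → Spec_get_skill_overlap resume_skills job_skills (get_skill_overlap resume_skills job_skills)

-- ===== LEMMAS AND PROOFS =====

-- value of the resume pass at any key
theorem getD_resume_pass (l : List String) (d : PySem.Dict String (Bool × Bool)) (k : String) :
    (l.foldl (fun d s => d.insert (PySem.Str.lower s) (true, false)) d).getD k (false, false)
      = if k ∈ l.map PySem.Str.lower then (true, false) else d.getD k (false, false) := by
  induction l generalizing d with
  | nil => simp
  | cons s l ih =>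
    simp only [List.foldl_cons, ih, List.map_cons, List.mem_cons, PySem.Dict.getD_insert]
    by_cases h : k = PySem.Str.lower s <;> simp [h]

-- value of the job pass at any key: the job flag is set, the resume flag is preserved
theorem getD_job_pass (l : List String) (d : PySem.Dict String (Bool × Bool)) (k : String) :
    (l.foldl (fun d s => PySem.Dict.modify d (PySem.Str.lower s) (false, false) (fun p => (p.1, true))) d).getD k (false, false)
      = if k ∈ l.map PySem.Str.lower then ((d.getD k (false, false)).1, true)
        else d.getD k (false, false) := by
  induction l generalizing d with
  | nil => simp
  | cons s l ih =>
    simp only [List.foldl_cons, ih, List.map_cons, List.mem_cons, PySem.Dict.getD_modify]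
    by_cases h : k = PySem.Str.lower s <;> simp [h]

-- the single partitioning pass is three filters
theorem partition_pass (ps : List (String × (Bool × Bool))) (m mi ex : List String) :
    ps.foldl
      (fun acc p =>
        if p.2.1 && p.2.2 then (acc.1 ++ [p.1], acc.2.1, acc.2.2)
        else if p.2.2 then (acc.1, acc.2.1 ++ [p.1], acc.2.2)
        else (acc.1, acc.2.1, acc.2.2 ++ [p.1]))
      (m, mi, ex)
      = (m ++ (ps.filter (fun p => p.2.1 && p.2.2)).map (·.1),
         mi ++ (ps.filter (fun p => !p.2.1 && p.2.2)).map (·.1),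
         ex ++ (ps.filter (fun p => !p.2.2)).map (·.1)) := by
  induction ps generalizing m mi ex with
  | nil => simp
  | cons p ps ih =>
    obtain ⟨k, b1, b2⟩ := p
    cases b1 <;> cases b2 <;>
      first
        | simpa using ih (m ++ [k]) mi ex
        | simpa using ih m (mi ++ [k]) ex
        | simpa using ih m mi (ex ++ [k])

-- the flag value of the finished status dict at any key
theorem getD_status (r j : List String) (k : String) :
    ((j.foldl (fun d s => PySem.Dict.modify d (PySem.Str.lower s) (false, false) (fun p => (p.1, true)))
        (r.foldl (fun d s => d.insert (PySem.Str.lower s) (true, false)) PySem.Dict.empty)).getD k (false, false))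
      = (decide (k ∈ r.map PySem.Str.lower), decide (k ∈ j.map PySem.Str.lower)) := by
  rw [getD_job_pass, getD_resume_pass]
  by_cases h1 : k ∈ r.map PySem.Str.lower <;> by_cases h2 : k ∈ j.map PySem.Str.lower <;>
    simp [h1, h2]

-- the keys of the finished status dict
theorem keys_status (r j : List String) :
    ((j.foldl (fun d s => PySem.Dict.modify d (PySem.Str.lower s) (false, false) (fun p => (p.1, true)))
        (r.foldl (fun d s => d.insert (PySem.Str.lower s) (true, false)) PySem.Dict.empty)).keys)
      = PySem.Set.update (PySem.Set.ofList (r.map PySem.Str.lower)) (j.map PySem.Str.lower) := by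
  rw [PySem.Dict.keys_foldl_modify_key, PySem.Dict.keys_foldl_insert_key]
  simp [PySem.Set.update_nil_left]

theorem get_skill_overlap_eq (r j : List String) :
    get_skill_overlap r j = get_skill_overlap_alt r j := by
  have hnd : ((j.foldl (fun d s => PySem.Dict.modify d (PySem.Str.lower s) (false, false) (fun p => (p.1, true)))
      (r.foldl (fun d s => d.insert (PySem.Str.lower s) (true, false)) PySem.Dict.empty)).keys).Nodup := by
    rw [keys_status]
    exact PySem.Set.nodup_update _ _ (PySem.Set.nodup_ofList _)
  have hitems : ((j.foldl (fun d s => PySem.Dict.modify d (PySem.Str.lower s) (false, false) (fun p => (p.1, true)))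
      (r.foldl (fun d s => d.insert (PySem.Str.lower s) (true, false)) PySem.Dict.empty)).items)
      = (PySem.Set.update (PySem.Set.ofList (r.map PySem.Str.lower)) (j.map PySem.Str.lower)).map
          (fun k => (k, (decide (k ∈ r.map PySem.Str.lower), decide (k ∈ j.map PySem.Str.lower)))) := by
    rw [PySem.Dict.items_eq_map_keys _ hnd (false, false), keys_status]
    exact List.map_congr_left (fun k _ => by rw [getD_status])
  unfold get_skill_overlap get_skill_overlap_alt
  simp only [hitems, partition_pass, List.nil_append, List.filter_map, List.map_map]
  have hU : (PySem.Set.update (PySem.Set.ofList (r.map PySem.Str.lower)) (j.map PySem.Str.lower)).Nodup :=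
    PySem.Set.nodup_update _ _ (PySem.Set.nodup_ofList _)
  refine congrArg₂ _ (congrArg _ ?_) (congrArg₂ _ (congrArg _ ?_) (congrArg₂ _ (congrArg _ ?_) rfl))
  · apply PySem.List.sorted_eq_sorted_of_perm _ _ _ (fun a b h => h)
    refine (List.perm_ext_iff_of_nodup (PySem.Set.nodup_inter _ _ (PySem.Set.nodup_ofList _)) ?_).mpr ?_
    · exact (hU.filter _).map (fun a b h => h)
    · intro y
      simp [PySem.Set.mem_inter, PySem.Set.mem_ofList, List.mem_filter, PySem.Set.mem_update,
        Function.comp]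
      tauto
  · apply PySem.List.sorted_eq_sorted_of_perm _ _ _ (fun a b h => h)
    refine (List.perm_ext_iff_of_nodup (PySem.Set.nodup_diff _ _ (PySem.Set.nodup_ofList _)) ?_).mpr ?_
    · exact (hU.filter _).map (fun a b h => h)
    · intro y
      simp [PySem.Set.mem_diff, PySem.Set.mem_ofList, List.mem_filter, PySem.Set.mem_update,
        Function.comp]
      tauto
  · apply PySem.List.sorted_eq_sorted_of_perm _ _ _ (fun a b h => h)
    refine (List.perm_ext_iff_of_nodup (PySem.Set.nodup_diff _ _ (PySem.Set.nodup_ofList _)) ?_).mpr ?_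
    · exact (hU.filter _).map (fun a b h => h)
    · intro y
      simp [PySem.Set.mem_diff, PySem.Set.mem_ofList, List.mem_filter, PySem.Set.mem_update,
        Function.comp]
      tauto

-- ===== VERDICT (by name: the statement is the Claim_ definition above) =====
theorem get_skill_overlap_spec : Claim_equal_get_skill_overlap := by
  intro r j _
  exact (get_skill_overlap_eq r j).symm ▸ rfl
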